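-- pv_equiv track=rewrite | github.com/zoejuu/leetcode | programmers/dp/n_representation.py | solution
-- ===== SOURCE A (Python) =====
-- def solution(N, number):
--     '''https://school.programmers.co.kr/learn/courses/30/lessons/42895'''
--     # dp 리스트의 원소는 N을 1..8번 사용해서 만들 수 있는 정수들의 집합
--     # dp = [set(), set(), set()...]
--     dp = [set() for _ in range(9)]
--
--     for k in range(1, 9):
--         # k -> 1 2 3 4 5 6 7 8
--         dp[k].add(int(str(N) * k))
--
--         for i in range(1, k):
--             # k = 4 | i = 1, 2, 3 | j = 3, 2, 1
--             j = k - i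
--             for x in dp[i]: # 이전 값들을 불러옴
--                 for y in dp[j]:
--                     dp[k].add(x + y)
--                     dp[k].add(x - y)
--                     dp[k].add(x * y)
--                     dp[k].add(x // y)
--                     dp[k] -= {num for num in dp[k] if num <= 0 or num >= 32000}
--         if number in dp[k]:
--             return k
--
--     return -1
-- ===== SOURCE B (Python) =====
-- def solution(N, number):
--     # Lazily memoized recursion instead of the bottom-up dp table; each level is
--     # filtered once, instead of rebuilding the in-range set after every pair.
--     memo = {}
--
--     def reps(k):
--         if k in memo:
--             return memo[k]
--         vals = {int(str(N) * k)}
--         for i in range(1, k):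
--             xs = reps(i)
--             ys = reps(k - i)
--             for x in xs:
--                 for y in ys:
--                     vals.update((x + y, x - y, x * y, x // y))
--         if k > 1:
--             vals = {v for v in vals if 0 < v < 32000}
--         memo[k] = vals
--         return vals
--
--     for k in range(1, 9):
--         if number in reps(k):
--             return k
--     return -1
-- ===== Notes on version B (the rewrite author's own statement) =====
-- stated objective: faster
-- what changed: The bottom-up dp table of sets is replaced by a lazily memoized recursive reps(k) that filters each level once at the end, instead of rebuilding the in-range set after every (x, y) pair as A does.
import Mathlib
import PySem

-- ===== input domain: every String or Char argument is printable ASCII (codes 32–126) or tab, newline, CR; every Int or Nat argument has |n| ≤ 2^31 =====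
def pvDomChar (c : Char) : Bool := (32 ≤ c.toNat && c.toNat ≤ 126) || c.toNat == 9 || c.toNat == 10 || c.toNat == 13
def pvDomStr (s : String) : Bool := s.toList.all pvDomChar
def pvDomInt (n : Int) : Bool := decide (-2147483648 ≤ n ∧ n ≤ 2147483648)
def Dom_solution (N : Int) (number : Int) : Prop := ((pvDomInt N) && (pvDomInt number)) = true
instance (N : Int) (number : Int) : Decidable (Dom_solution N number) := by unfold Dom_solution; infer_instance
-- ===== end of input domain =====

-- B replaces the bottom-up dp table by a lazily memoized recursive reps(k) that filters each
-- level once instead of rebuilding the in-range set after every pair (same return values).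

-- ===== PORT A =====
-- Hand port of Python's int(str(N) * k) (PySem has no str-repeat→int bridge).  pvPow10 m is
-- 10^(number of decimal digits of m), so pvBase N k is exactly the integer whose decimal
-- notation is k copies of str(N) — exact for N ≥ 0 and every k, and exact for every N when
-- k = 1 (int(str(N)) = N); for N < 0 and k ≥ 2 Python raises ValueError, outside Pre_.
def pvPow10 (m : Nat) : Int :=
  if m < 10 then 10 else 10 * pvPow10 (m / 10)
termination_by m
decreasing_by exact Nat.div_lt_self (by omega) (by norm_num)

def pvBase (N : Int) : Nat → Int
  | 0 => 0
  | k + 1 => pvBase N k * pvPow10 N.toNat + N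

-- the four dp[k].add(...) statements for one pair (x, y)
def pvAdd4 (s : PySem.Set Int) (x y : Int) : PySem.Set Int :=
  PySem.Set.add (PySem.Set.add (PySem.Set.add (PySem.Set.add s (x + y)) (x - y)) (x * y))
    (PySem.Int.floordiv x y)

-- dp[k] -= {num for num in dp[k] if num <= 0 or num >= 32000}
def pvPrune (s : PySem.Set Int) : PySem.Set Int :=
  PySem.Set.diff s
    (PySem.Set.ofList (s.filter (fun num => decide (num ≤ 0) || decide ((32000 : Int) ≤ num))))

-- one k-iteration: dp[k].add(int(str(N)*k)); then the i / x / y loops with the prune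
def pvDpStep (dp : List (PySem.Set Int)) (N : Int) (k : Nat) : PySem.Set Int :=
  (List.range' 1 (k - 1)).foldl
    (fun s i =>
      (dp.getD i PySem.Set.empty).foldl
        (fun s x =>
          (dp.getD (k - i) PySem.Set.empty).foldl (fun s y => pvPrune (pvAdd4 s x y)) s)
        s)
    (PySem.Set.add (dp.getD k PySem.Set.empty) (pvBase N k))

-- for k in range(1, 9): build dp[k], early-return k if number in dp[k]
def pvLoopA (N number : Int) : List Nat → List (PySem.Set Int) → Int
  | [], _ => -1
  | k :: ks, dp =>
    let dpk := pvDpStep dp N k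
    if PySem.Set.contains dpk number then (k : Int)
    else pvLoopA N number ks (dp.set k dpk)

def solution (N : Int) (number : Int) : Int :=
  pvLoopA N number (List.range' 1 8) (List.replicate 9 PySem.Set.empty)

-- ===== PORT B =====
-- reps(k) with its memo dict threaded through (Source B's `memo`); returns (memo, value)
def pvRepsGo (N : Int) (k : Nat) (memo : PySem.Dict Nat (PySem.Set Int)) :
    PySem.Dict Nat (PySem.Set Int) × PySem.Set Int :=
  match memo.get? k with
  | some v => (memo, v)
  | none =>
    let st := (List.range' 1 (k - 1)).attach.foldl
      (fun (st : PySem.Dict Nat (PySem.Set Int) × PySem.Set Int) iw =>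
        let p1 := pvRepsGo N iw.1 st.1
        let p2 := pvRepsGo N (k - iw.1) p1.1
        (p2.1, p1.2.foldl (fun s x => p2.2.foldl (fun s y => pvAdd4 s x y) s) st.2))
      (memo, PySem.Set.add PySem.Set.empty (pvBase N k))
    let vals :=
      if 1 < k then
        PySem.Set.ofList (st.2.filter (fun v => decide (0 < v) && decide (v < 32000)))
      else st.2
    (st.1.insert k vals, vals)
termination_by k
decreasing_by
  · have h := iw.2; rw [List.mem_range'_1] at h; omega
  · have h := iw.2; rw [List.mem_range'_1] at h; omega

def pvLoopB (N number : Int) : List Nat → PySem.Dict Nat (PySem.Set Int) → Int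
  | [], _ => -1
  | k :: ks, memo =>
    let p := pvRepsGo N k memo
    if PySem.Set.contains p.2 number then (k : Int) else pvLoopB N number ks p.1

def solution_alt (N : Int) (number : Int) : Int :=
  pvLoopB N number (List.range' 1 8) PySem.Dict.empty

-- ===== PRECONDITION & SPEC =====
-- Pre_ excludes exactly the inputs where A raises: N ≤ 0 with number ≠ N (ValueError on
-- int(str(N)*2) for N < 0, ZeroDivisionError 0 // 0 for N = 0); with number = N both
-- programs return 1 at k = 1 before touching k = 2, so those inputs stay inside Pre_.
def Pre_solution (N : Int) (number : Int) : Prop := 1 ≤ N ∨ number = N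
instance (N : Int) (number : Int) : Decidable (Pre_solution N number) := by
  unfold Pre_solution; infer_instance

def pvWitness_solution : Int × Int := (5, 55)

def Spec_solution (N : Int) (number : Int) (out : Int) : Prop := out = solution_alt N number
instance (N : Int) (number : Int) (out : Int) : Decidable (Spec_solution N number out) := by
  unfold Spec_solution; infer_instance

-- ===== CLAIM (what is proved, stated in full; the proofs are below) =====
def Claim_equal_solution : Prop := ∀ (N : Int) (number : Int), Dom_solution N number →
  Pre_solution N number → Spec_solution N number (solution N number)

-- ===== LEMMAS AND PROOFS =====

-- the in-range filter shared by both programs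
def pvF (s : List Int) : List Int := s.filter (fun v => decide (0 < v) && decide (v < 32000))

-- adding a whole list of candidates, one Set.add at a time
def pvAddL (s : PySem.Set Int) (l : List Int) : PySem.Set Int := l.foldl PySem.Set.add s

-- the four candidate values of one pair
def pvQuad (q : Int × Int) : List Int := [q.1 + q.2, q.1 - q.2, q.1 * q.2, PySem.Int.floordiv q.1 q.2]

-- the pure (memo-free) value of reps(k); proof-side mirror of pvRepsGo
def pvRepsSpec (N : Int) (k : Nat) : PySem.Set Int :=
  let vals := (List.range' 1 (k - 1)).attach.foldl
    (fun s iw =>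
      (pvRepsSpec N iw.1).foldl
        (fun s x => (pvRepsSpec N (k - iw.1)).foldl (fun s y => pvAdd4 s x y) s) s)
    (PySem.Set.add PySem.Set.empty (pvBase N k))
  if 1 < k then
    PySem.Set.ofList (vals.filter (fun v => decide (0 < v) && decide (v < 32000)))
  else vals
termination_by k
decreasing_by
  · have h := iw.2; rw [List.mem_range'_1] at h; omega
  · have h := iw.2; rw [List.mem_range'_1] at h; omega

-- all pairs (x, y) combined at level k
def pvPairs (N : Int) (k : Nat) : List (Int × Int) :=
  (List.range' 1 (k - 1)).flatMap (fun i => pvRepsSpec N i ×ˢ pvRepsSpec N (k - i))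

theorem pvBase_one (N : Int) : pvBase N 1 = N := by
  show pvBase N 0 * pvPow10 N.toNat + N = N
  simp [pvBase]

theorem pvAdd4_eq_addL (s : PySem.Set Int) (x y : Int) :
    pvAdd4 s x y = pvAddL s (pvQuad (x, y)) := rfl

theorem pvPrune_eq (s : PySem.Set Int) : pvPrune s = pvF s := by
  show s.filter _ = s.filter _
  refine List.filter_congr ?_
  intro x hx
  by_cases hb : x ∈ s.filter (fun num => decide (num ≤ 0) || decide ((32000 : Int) ≤ num))
  · have h1 : PySem.Set.contains
        (PySem.Set.ofList (s.filter (fun num => decide (num ≤ 0) || decide ((32000 : Int) ≤ num)))) x = true :=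
      (PySem.Set.contains_iff _ _).mpr (by rw [PySem.Set.mem_ofList]; exact hb)
    have h2 := (List.mem_filter.mp hb).2
    rw [h1]
    simp only [Bool.or_eq_true, decide_eq_true_eq] at h2
    simp only [Bool.not_true]
    rcases h2 with h | h
    · simp [show ¬ (0:Int) < x by omega]
    · simp [show ¬ x < (32000:Int) by omega]
  · have h1 : PySem.Set.contains
        (PySem.Set.ofList (s.filter (fun num => decide (num ≤ 0) || decide ((32000 : Int) ≤ num)))) x = false := by
      rw [← Bool.not_eq_true]
      intro hc
      exact hb ((PySem.Set.mem_ofList _ _).mp ((PySem.Set.contains_iff _ _).mp hc))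
    have h2 : ¬ ((decide (x ≤ 0) || decide ((32000 : Int) ≤ x)) = true) := by
      intro hc
      exact hb (List.mem_filter.mpr ⟨hx, hc⟩)
    rw [h1]
    simp only [Bool.or_eq_true, decide_eq_true_eq, not_or] at h2
    simp only [Bool.not_false]
    simp [show (0:Int) < x by omega, show x < (32000:Int) by omega]

theorem pvF_idem (s : List Int) : pvF (pvF s) = pvF s := by
  simp [pvF, List.filter_filter]

theorem pvF_subset {x : Int} {s : List Int} (h : x ∈ pvF s) : x ∈ s :=
  (List.mem_filter.mp h).1

theorem mem_pvF {x : Int} {s : List Int} :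
    x ∈ pvF s ↔ x ∈ s ∧ (decide (0 < x) && decide (x < 32000)) = true := List.mem_filter

theorem pvF_add (s : PySem.Set Int) (b : Int) :
    pvF (PySem.Set.add s b) =
      if decide (0 < b) && decide (b < 32000) then PySem.Set.add (pvF s) b else pvF s := by
  by_cases hm : b ∈ s
  · have hc : PySem.Set.contains s b = true := (PySem.Set.contains_iff _ _).mpr hm
    show pvF (if PySem.Set.contains s b = true then s else s ++ [b]) = _
    rw [hc, if_pos rfl]
    by_cases hp : (decide (0 < b) && decide (b < 32000)) = true
    · have hcf : PySem.Set.contains (pvF s) b = true :=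
        (PySem.Set.contains_iff _ _).mpr (mem_pvF.mpr ⟨hm, hp⟩)
      rw [if_pos hp]
      show pvF s = if PySem.Set.contains (pvF s) b = true then pvF s else pvF s ++ [b]
      rw [hcf, if_pos rfl]
    · rw [if_neg hp]
  · have hc : PySem.Set.contains s b = false := by
      rw [← Bool.not_eq_true]; intro h; exact hm ((PySem.Set.contains_iff _ _).mp h)
    show pvF (if PySem.Set.contains s b = true then s else s ++ [b]) = _
    rw [hc, if_neg (by simp)]
    show (s ++ [b]).filter _ = _
    rw [List.filter_append]
    by_cases hp : (decide (0 < b) && decide (b < 32000)) = true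
    · have hcf : PySem.Set.contains (pvF s) b = false := by
        rw [← Bool.not_eq_true]; intro h
        exact hm (pvF_subset ((PySem.Set.contains_iff _ _).mp h))
      rw [if_pos hp]
      show pvF s ++ List.filter _ [b] = if PySem.Set.contains (pvF s) b = true then pvF s else pvF s ++ [b]
      rw [hcf, if_neg (by simp)]
      simp [List.filter, hp]
    · rw [if_neg hp]
      have : List.filter (fun v => decide (0 < v) && decide (v < 32000)) [b] = [] := by
        simp only [List.filter, hp]
      rw [this, List.append_nil]
      rfl

theorem pvF_add_F (s : PySem.Set Int) (b : Int) :
    pvF (PySem.Set.add (pvF s) b) = pvF (PySem.Set.add s b) := by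
  rw [pvF_add, pvF_add, pvF_idem]

theorem pvF_addL_F (l : List Int) : ∀ s, pvF (pvAddL (pvF s) l) = pvF (pvAddL s l) := by
  induction l with
  | nil => intro s; exact pvF_idem s
  | cons b l ih =>
    intro s
    show pvF (pvAddL (PySem.Set.add (pvF s) b) l) = pvF (pvAddL (PySem.Set.add s b) l)
    rw [← ih (PySem.Set.add (pvF s) b), pvF_add_F, ih]

theorem pvF_fold_add4_F (qs : List (Int × Int)) :
    ∀ s, pvF (qs.foldl (fun s q => pvAdd4 s q.1 q.2) (pvF s)) =
      pvF (qs.foldl (fun s q => pvAdd4 s q.1 q.2) s) := by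
  induction qs with
  | nil => intro s; exact pvF_idem s
  | cons q qs ih =>
    intro s
    show pvF (qs.foldl _ (pvAdd4 (pvF s) q.1 q.2)) = pvF (qs.foldl _ (pvAdd4 s q.1 q.2))
    rw [← ih (pvAdd4 (pvF s) q.1 q.2), pvAdd4_eq_addL, pvAdd4_eq_addL, pvF_addL_F, ih]

-- A prunes after every pair; with at least one pair that collapses to one final filter
theorem pvCollapse (qs : List (Int × Int)) (hne : qs ≠ []) :
    ∀ s, qs.foldl (fun s q => pvF (pvAdd4 s q.1 q.2)) s =
      pvF (qs.foldl (fun s q => pvAdd4 s q.1 q.2) s) := by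
  induction qs with
  | nil => exact absurd rfl hne
  | cons q qs ih =>
    intro s
    cases qs with
    | nil => rfl
    | cons q' qs' =>
      show List.foldl (fun s q => pvF (pvAdd4 s q.1 q.2)) (pvF (pvAdd4 s q.1 q.2)) (q' :: qs') = _
      rw [ih (by simp) (pvF (pvAdd4 s q.1 q.2)),
        pvF_fold_add4_F (q' :: qs') (pvAdd4 s q.1 q.2)]
      rfl

-- nested iteration over two lists = one fold over their product
theorem pvProdFold {S : Type} (g : S → Int → Int → S) (xs : List Int) :
    ∀ (ys : List Int) (s : S),
      xs.foldl (fun s x => ys.foldl (fun s y => g s x y) s) s =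
        (xs ×ˢ ys).foldl (fun s q => g s q.1 q.2) s := by
  induction xs with
  | nil => intro ys s; simp
  | cons x xs ih =>
    intro ys s
    simp only [List.foldl_cons, List.product_cons, List.foldl_append, List.foldl_map]
    exact ih ys _

-- a fold of folds over blocks = one fold over the flattened list
theorem pvFlatFold {S I : Type} (pl : I → List (Int × Int)) (step : S → (Int × Int) → S)
    (is : List I) : ∀ s : S,
      is.foldl (fun s i => (pl i).foldl step s) s = (is.flatMap pl).foldl step s := by
  induction is with
  | nil => intro s; simp
  | cons i is ih => intro s; simp only [List.foldl_cons, List.flatMap_cons, List.foldl_append]; exact ih _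

theorem pvFoldAdd4_eq_addL (qs : List (Int × Int)) : ∀ s,
    qs.foldl (fun s q => pvAdd4 s q.1 q.2) s = pvAddL s (qs.flatMap pvQuad) := by
  induction qs with
  | nil => intro s; simp [pvAddL]
  | cons q qs ih =>
    intro s
    simp only [List.foldl_cons, List.flatMap_cons]
    rw [ih, pvAdd4_eq_addL]
    show pvAddL (pvAddL s (pvQuad q)) _ = _
    rw [pvAddL, pvAddL, pvAddL, ← List.foldl_append]

theorem mem_pvAddL {x : Int} (l : List Int) : ∀ s, x ∈ pvAddL s l ↔ x ∈ s ∨ x ∈ l := by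
  induction l with
  | nil => intro s; simp [pvAddL]
  | cons b l ih =>
    intro s
    show x ∈ pvAddL (PySem.Set.add s b) l ↔ _
    rw [ih]
    simp [PySem.Set.mem_add]
    tauto

theorem pvNodup_addL (l : List Int) : ∀ s : PySem.Set Int, s.Nodup → (pvAddL s l).Nodup := by
  induction l with
  | nil => intro s h; exact h
  | cons b l ih => intro s h; exact ih _ (PySem.Set.nodup_add _ _ h)

-- pvRepsSpec in closed form: one filter over the fold of all pairs
theorem pvFoldAdd4_nodup (qs : List (Int × Int)) (s : PySem.Set Int) (h : s.Nodup) :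
    (qs.foldl (fun s q => pvAdd4 s q.1 q.2) s).Nodup := by
  rw [pvFoldAdd4_eq_addL]; exact pvNodup_addL _ _ h

theorem pvInit_nodup (b : Int) : (PySem.Set.add PySem.Set.empty b).Nodup :=
  PySem.Set.nodup_add _ _ List.nodup_nil

theorem pvRepsSpec_closed (N : Int) (k : Nat) (hk : 2 ≤ k) :
    pvRepsSpec N k =
      pvF ((pvPairs N k).foldl (fun s q => pvAdd4 s q.1 q.2)
        (PySem.Set.add PySem.Set.empty (pvBase N k))) := by
  rw [pvRepsSpec]
  rw [if_pos (by omega : 1 < k)]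
  rw [List.foldl_attach (l := List.range' 1 (k - 1))
    (f := fun s i => (pvRepsSpec N i).foldl
      (fun s x => (pvRepsSpec N (k - i)).foldl (fun s y => pvAdd4 s x y) s) s)]
  have hcongr : (List.range' 1 (k - 1)).foldl
      (fun s i => (pvRepsSpec N i).foldl
        (fun s x => (pvRepsSpec N (k - i)).foldl (fun s y => pvAdd4 s x y) s) s)
      (PySem.Set.empty.add (pvBase N k)) =
    (List.range' 1 (k - 1)).foldl
      (fun s i => (pvRepsSpec N i ×ˢ pvRepsSpec N (k - i)).foldl (fun s q => pvAdd4 s q.1 q.2) s)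
      (PySem.Set.empty.add (pvBase N k)) :=
    PySem.List.foldl_congr_mem _ _ _ _
      (fun acc i _ => pvProdFold pvAdd4 (pvRepsSpec N i) (pvRepsSpec N (k - i)) acc)
  rw [hcongr]
  rw [pvFlatFold (fun i => pvRepsSpec N i ×ˢ pvRepsSpec N (k - i))
    (fun s q => pvAdd4 s q.1 q.2) (List.range' 1 (k - 1))]
  show PySem.Set.ofList _ =
    List.filter (fun v => decide (0 < v) && decide (v < 32000))
      (List.foldl (fun s q => pvAdd4 s q.1 q.2) (PySem.Set.empty.add (pvBase N k)) (pvPairs N k))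
  exact PySem.Set.ofList_eq_self_of_nodup _
    (List.Nodup.filter _ (pvFoldAdd4_nodup _ _ (pvInit_nodup _)))

theorem pvRepsSpec_one (N : Int) : pvRepsSpec N 1 = [N] := by
  rw [pvRepsSpec]
  show (if 1 < 1 then _ else PySem.Set.add PySem.Set.empty (pvBase N 1)) = [N]
  rw [if_neg (by omega), pvBase_one]
  rfl

-- every element of a spec level with k ≥ 2 is in range; level 1 is exactly [N]
theorem mem_pvRepsSpec_closed (N : Int) (k : Nat) (hk : 2 ≤ k) (x : Int) :
    x ∈ pvRepsSpec N k ↔ (decide (0 < x) && decide (x < 32000)) = true ∧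
      (x = pvBase N k ∨ x ∈ (pvPairs N k).flatMap pvQuad) := by
  rw [pvRepsSpec_closed N k hk]
  rw [show pvF ((pvPairs N k).foldl (fun s q => pvAdd4 s q.1 q.2)
      (PySem.Set.add PySem.Set.empty (pvBase N k))) =
    List.filter (fun v => decide (0 < v) && decide (v < 32000))
      ((pvPairs N k).foldl (fun s q => pvAdd4 s q.1 q.2)
        (PySem.Set.add PySem.Set.empty (pvBase N k))) from rfl]
  rw [List.mem_filter, pvFoldAdd4_eq_addL, mem_pvAddL]
  simp only [PySem.Set.mem_add]
  constructor
  · rintro ⟨h1, h2⟩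
    refine ⟨h2, ?_⟩
    rcases h1 with (h | h) | h
    · exact absurd h (List.not_mem_nil)
    · exact Or.inl h
    · exact Or.inr h
  · rintro ⟨h2, h1⟩
    refine ⟨?_, h2⟩
    rcases h1 with h | h
    · exact Or.inl (Or.inr h)
    · exact Or.inr h

theorem pvFloordiv_self (x : Int) (hx : 0 < x) : PySem.Int.floordiv x x = 1 := by
  rw [PySem.Int.floordiv_eq_ediv_of_pos hx]
  exact Int.ediv_self (by omega)

theorem one_mem_pvRepsSpec (N : Int) (hN : 1 ≤ N) :
    (1 : Int) ∈ pvRepsSpec N 2 ∧ (1 : Int) ∈ pvRepsSpec N 4 ∧ (1 : Int) ∈ pvRepsSpec N 6 := by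
  have hq : ∀ q : Int × Int, PySem.Int.floordiv q.1 q.2 ∈ pvQuad q := by
    intro q; simp [pvQuad]
  have hNm : N ∈ pvRepsSpec N 1 := by rw [pvRepsSpec_one]; exact List.mem_singleton.mpr rfl
  have h2 : (1 : Int) ∈ pvRepsSpec N 2 := by
    rw [mem_pvRepsSpec_closed N 2 (by omega)]
    refine ⟨by decide, Or.inr (List.mem_flatMap.mpr ⟨(N, N), ?_, ?_⟩)⟩
    · exact List.mem_flatMap.mpr ⟨1, by decide, List.pair_mem_product.mpr ⟨hNm, hNm⟩⟩
    · rw [show (1 : Int) = PySem.Int.floordiv N N from (pvFloordiv_self N (by omega)).symm]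
      exact hq (N, N)
  have h11 : (1 : Int) ∈ pvQuad (1, 1) := by
    rw [show (1 : Int) = PySem.Int.floordiv 1 1 from (pvFloordiv_self 1 (by omega)).symm]
    exact hq (1, 1)
  have h4 : (1 : Int) ∈ pvRepsSpec N 4 := by
    rw [mem_pvRepsSpec_closed N 4 (by omega)]
    refine ⟨by decide, Or.inr (List.mem_flatMap.mpr ⟨(1, 1), ?_, h11⟩)⟩
    exact List.mem_flatMap.mpr ⟨2, by decide, List.pair_mem_product.mpr ⟨h2, h2⟩⟩
  have h6 : (1 : Int) ∈ pvRepsSpec N 6 := by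
    rw [mem_pvRepsSpec_closed N 6 (by omega)]
    refine ⟨by decide, Or.inr (List.mem_flatMap.mpr ⟨(1, 1), ?_, h11⟩)⟩
    exact List.mem_flatMap.mpr ⟨2, by decide, List.pair_mem_product.mpr ⟨h2, h4⟩⟩
  exact ⟨h2, h4, h6⟩

theorem pvPairs_ne (N : Int) (hN : 1 ≤ N) (k : Nat) (h2 : 2 ≤ k) (h8 : k ≤ 8) :
    pvPairs N k ≠ [] := by
  obtain ⟨h2m, h4m, h6m⟩ := one_mem_pvRepsSpec N hN
  have hNm : N ∈ pvRepsSpec N 1 := by rw [pvRepsSpec_one]; exact List.mem_singleton.mpr rfl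
  interval_cases k
  · exact List.ne_nil_of_mem
      (List.mem_flatMap.mpr ⟨1, by decide, List.pair_mem_product.mpr ⟨hNm, hNm⟩⟩)
  · exact List.ne_nil_of_mem
      (List.mem_flatMap.mpr ⟨1, by decide, List.pair_mem_product.mpr ⟨hNm, h2m⟩⟩)
  · exact List.ne_nil_of_mem
      (List.mem_flatMap.mpr ⟨2, by decide, List.pair_mem_product.mpr ⟨h2m, h2m⟩⟩)
  · exact List.ne_nil_of_mem
      (List.mem_flatMap.mpr ⟨1, by decide, List.pair_mem_product.mpr ⟨hNm, h4m⟩⟩)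
  · exact List.ne_nil_of_mem
      (List.mem_flatMap.mpr ⟨2, by decide, List.pair_mem_product.mpr ⟨h2m, h4m⟩⟩)
  · exact List.ne_nil_of_mem
      (List.mem_flatMap.mpr ⟨1, by decide, List.pair_mem_product.mpr ⟨hNm, h6m⟩⟩)
  · exact List.ne_nil_of_mem
      (List.mem_flatMap.mpr ⟨2, by decide, List.pair_mem_product.mpr ⟨h2m, h6m⟩⟩)

-- dp invariant: levels below k hold the spec sets, levels from k on are still empty
def pvInv (N : Int) (dp : List (PySem.Set Int)) (k : Nat) : Prop :=
  dp.length = 9 ∧ (∀ i, 1 ≤ i → i < k → dp.getD i PySem.Set.empty = pvRepsSpec N i) ∧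
    (∀ i, k ≤ i → i < 9 → dp.getD i PySem.Set.empty = PySem.Set.empty)

theorem pvStep_eq (N : Int) (hN : 1 ≤ N) (k : Nat) (h1 : 1 ≤ k) (h8 : k ≤ 8)
    (dp : List (PySem.Set Int)) (hinv : pvInv N dp k) : pvDpStep dp N k = pvRepsSpec N k := by
  obtain ⟨hlen, hlow, hhigh⟩ := hinv
  by_cases hk1 : k = 1
  · subst hk1
    show (List.range' 1 0).foldl _ (PySem.Set.add (dp.getD 1 PySem.Set.empty) (pvBase N 1)) = _
    rw [hhigh 1 le_rfl (by omega), pvRepsSpec_one, pvBase_one]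
    rfl
  · have hk2 : 2 ≤ k := by omega
    unfold pvDpStep
    rw [hhigh k le_rfl (by omega)]
    have hcongr : (List.range' 1 (k - 1)).foldl
        (fun s i => (dp.getD i PySem.Set.empty).foldl
          (fun s x => (dp.getD (k - i) PySem.Set.empty).foldl
            (fun s y => pvPrune (pvAdd4 s x y)) s) s)
        (PySem.Set.add PySem.Set.empty (pvBase N k)) =
      (List.range' 1 (k - 1)).foldl
        (fun s i => (pvRepsSpec N i ×ˢ pvRepsSpec N (k - i)).foldl
          (fun s q => pvF (pvAdd4 s q.1 q.2)) s)
        (PySem.Set.add PySem.Set.empty (pvBase N k)) := by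
      refine PySem.List.foldl_congr_mem _ _ _ _ ?_
      intro acc i hi
      rw [List.mem_range'_1] at hi
      rw [hlow i hi.1 (by omega), hlow (k - i) (by omega) (by omega)]
      simp only [pvPrune_eq]
      exact pvProdFold (fun s x y => pvF (pvAdd4 s x y)) _ _ acc
    rw [hcongr]
    rw [pvFlatFold (fun i => pvRepsSpec N i ×ˢ pvRepsSpec N (k - i))
      (fun s q => pvF (pvAdd4 s q.1 q.2)) (List.range' 1 (k - 1))]
    rw [show List.flatMap (fun i => pvRepsSpec N i ×ˢ pvRepsSpec N (k - i))
      (List.range' 1 (k - 1)) = pvPairs N k from rfl]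
    rw [pvCollapse (pvPairs N k) (pvPairs_ne N hN k hk2 h8)]
    exact (pvRepsSpec_closed N k hk2).symm

-- memo correctness: a good memo stays good and pvRepsGo returns the spec value
def pvGood (N : Int) (memo : PySem.Dict Nat (PySem.Set Int)) : Prop :=
  ∀ j v, memo.get? j = some v → v = pvRepsSpec N j

theorem pvGoFold (N : Int) (k : Nat)
    (IH : ∀ j, j < k → ∀ memo, pvGood N memo →
      (pvRepsGo N j memo).2 = pvRepsSpec N j ∧ pvGood N (pvRepsGo N j memo).1) :
    ∀ (l : List {x // x ∈ List.range' 1 (k - 1)}) (memo : PySem.Dict Nat (PySem.Set Int))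
      (s : PySem.Set Int), pvGood N memo →
      (l.foldl
        (fun (st : PySem.Dict Nat (PySem.Set Int) × PySem.Set Int) iw =>
          let p1 := pvRepsGo N iw.1 st.1
          let p2 := pvRepsGo N (k - iw.1) p1.1
          (p2.1, p1.2.foldl (fun s x => p2.2.foldl (fun s y => pvAdd4 s x y) s) st.2))
        (memo, s)).2 =
        l.foldl
          (fun s iw => (pvRepsSpec N iw.1).foldl
            (fun s x => (pvRepsSpec N (k - iw.1)).foldl (fun s y => pvAdd4 s x y) s) s) s ∧
      pvGood N (l.foldl
        (fun (st : PySem.Dict Nat (PySem.Set Int) × PySem.Set Int) iw =>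
          let p1 := pvRepsGo N iw.1 st.1
          let p2 := pvRepsGo N (k - iw.1) p1.1
          (p2.1, p1.2.foldl (fun s x => p2.2.foldl (fun s y => pvAdd4 s x y) s) st.2))
        (memo, s)).1 := by
  intro l
  induction l with
  | nil => intro memo s hg; exact ⟨rfl, hg⟩
  | cons iw l ih =>
    intro memo s hg
    have hmem := iw.2
    rw [List.mem_range'_1] at hmem
    have h1 := IH iw.1 (by omega) memo hg
    have h2 := IH (k - iw.1) (by omega) _ h1.2
    simp only [List.foldl_cons]
    rw [h1.1, h2.1]
    exact ih _ _ h2.2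

theorem pvGo_spec (N : Int) (k : Nat) :
    ∀ memo, pvGood N memo →
      (pvRepsGo N k memo).2 = pvRepsSpec N k ∧ pvGood N (pvRepsGo N k memo).1 := by
  induction k using Nat.strong_induction_on with
  | _ k IH =>
    intro memo hg
    rw [pvRepsGo]
    cases hmk : memo.get? k with
    | some v => exact ⟨hg k v hmk, hg⟩
    | none =>
      have hfold := pvGoFold N k (fun j hj => IH j hj) (List.range' 1 (k - 1)).attach memo
        (PySem.Set.add PySem.Set.empty (pvBase N k)) hg
      rw [pvRepsSpec]
      constructor
      · show (if 1 < k then _ else _) = _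
        rw [hfold.1]
      · intro j v hjv
        by_cases hjk : j = k
        · rw [hjk] at hjv ⊢
          rw [PySem.Dict.get?_insert_self] at hjv
          rw [← Option.some_inj.mp hjv]
          rw [hfold.1, pvRepsSpec]
        · rw [PySem.Dict.get?_insert_of_ne] at hjv
          · exact hfold.2 j v hjv
          · exact hjk

theorem pvLoop_eq (N number : Int) (hN : 1 ≤ N) :
    ∀ (m k : Nat) (dp : List (PySem.Set Int)) (memo : PySem.Dict Nat (PySem.Set Int)),
      1 ≤ k → k + m = 9 → pvInv N dp k → pvGood N memo →
      pvLoopA N number (List.range' k m) dp = pvLoopB N number (List.range' k m) memo := by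
  intro m
  induction m with
  | zero => intro k dp memo _ _ _ _; rfl
  | succ m ih =>
    intro k dp memo hk h9 hinv hg
    rw [List.range'_succ]
    have hgo := pvGo_spec N k memo hg
    have hstep := pvStep_eq N hN k hk (by omega) dp hinv
    show (if PySem.Set.contains (pvDpStep dp N k) number then (k : Int)
        else pvLoopA N number (List.range' (k + 1) m) (dp.set k (pvDpStep dp N k))) =
      (if PySem.Set.contains (pvRepsGo N k memo).2 number then (k : Int)
        else pvLoopB N number (List.range' (k + 1) m) (pvRepsGo N k memo).1)
    rw [hstep, hgo.1]
    by_cases hc : PySem.Set.contains (pvRepsSpec N k) number = true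
    · rw [if_pos hc, if_pos hc]
    · rw [if_neg hc, if_neg hc]
      refine ih (k + 1) _ _ (by omega) (by omega) ?_ hgo.2
      obtain ⟨hlen, hlow, hhigh⟩ := hinv
      refine ⟨by rw [List.length_set]; exact hlen, ?_, ?_⟩
      · intro i hi1 hik
        rw [List.getD_eq_getElem?_getD]
        by_cases hik' : i = k
        · rw [hik']
          rw [List.getElem?_set_self (by omega)]
          rfl
        · rw [List.getElem?_set_ne (fun a => hik' a.symm)]
          rw [← List.getD_eq_getElem?_getD]
          exact hlow i hi1 (by omega)
      · intro i hi1 hi9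
        rw [List.getD_eq_getElem?_getD, List.getElem?_set_ne (by omega),
          ← List.getD_eq_getElem?_getD]
        exact hhigh i (by omega) hi9

-- ===== VERDICT (by name: the statement is the Claim_ definition above) =====
theorem solution_spec : Claim_equal_solution := by
  intro N number _ hpre
  unfold Spec_solution solution solution_alt
  by_cases hN : 1 ≤ N
  · refine pvLoop_eq N number hN 8 1 _ _ (by omega) (by omega) ?_ ?_
    · refine ⟨by simp, fun i h1 h2 => by omega, fun i _ h9 => ?_⟩
      simp [List.getD_eq_getElem?_getD, h9, PySem.Set.empty]
      interval_cases i <;> rfl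
    · intro j v h
      simp [PySem.Dict.get?, PySem.Dict.empty] at h
  · have hnum : number = N := hpre.resolve_left hN
    have hA : pvDpStep (List.replicate 9 PySem.Set.empty) N 1 = [N] := by
      show PySem.Set.add ((List.replicate 9 PySem.Set.empty).getD 1 PySem.Set.empty)
        (pvBase N 1) = [N]
      rw [pvBase_one]
      rfl
    have hB : (pvRepsGo N 1 PySem.Dict.empty).2 = [N] := by
      rw [pvRepsGo]
      show PySem.Set.add PySem.Set.empty (pvBase N 1) = [N]
      rw [pvBase_one]
      rfl
    have hc : PySem.Set.contains ([N] : PySem.Set Int) number = true :=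
      (PySem.Set.contains_iff _ _).mpr (by rw [hnum]; exact List.mem_singleton.mpr rfl)
    show (if PySem.Set.contains (pvDpStep (List.replicate 9 PySem.Set.empty) N 1) number
        then (1 : Int)
        else pvLoopA N number (List.range' 2 7)
          ((List.replicate 9 PySem.Set.empty).set 1
            (pvDpStep (List.replicate 9 PySem.Set.empty) N 1))) =
      (if PySem.Set.contains (pvRepsGo N 1 PySem.Dict.empty).2 number then (1 : Int)
        else pvLoopB N number (List.range' 2 7) (pvRepsGo N 1 PySem.Dict.empty).1)
    rw [hA, hB, if_pos hc, if_pos hc]
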